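-- pv_equiv track=rewrite | github.com/friteuseb/audit_maillage_interne_screamingfrog | 01_workflow_audit_ia_complet.py | extract_css_classes_from_xpath
-- ===== SOURCE A (Python) =====
-- def extract_css_classes_from_xpath(xpath: str) -> list:
--     """Extraire les classes CSS d'un XPath"""
--     classes = []
--     if "[@class='" in xpath:
--         parts = xpath.split("[@class='")
--         for part in parts[1:]:
--             class_end = part.find("']")
--             if class_end != -1:
--                 class_name = part[:class_end]
--                 classes.append(class_name)
--     return classes
-- ===== SOURCE B (Python) =====
-- MARKER = "[@class='"
--
-- def extract_css_classes_from_xpath(xpath: str) -> list: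
--     """Extraire les classes CSS d'un XPath (single forward scan, no parts list)"""
--     classes = []
--     s = xpath
--     i = s.find(MARKER)
--     while i != -1:
--         s = s[i + len(MARKER):]
--         i = s.find(MARKER)
--         e = s.find("']")
--         if e != -1 and (i == -1 or e < i):
--             classes.append(s[:e])
--     return classes
-- ===== Notes on version B (the rewrite author's own statement) =====
-- stated objective: alternative
-- what changed: Replaces A's split-into-a-parts-list plus per-part find pass by a single forward scan that repeatedly finds the next class marker and appends the slice up to the following closing quote-bracket when it precedes the next marker, so no parts list is ever materialised.
import Mathlib
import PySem

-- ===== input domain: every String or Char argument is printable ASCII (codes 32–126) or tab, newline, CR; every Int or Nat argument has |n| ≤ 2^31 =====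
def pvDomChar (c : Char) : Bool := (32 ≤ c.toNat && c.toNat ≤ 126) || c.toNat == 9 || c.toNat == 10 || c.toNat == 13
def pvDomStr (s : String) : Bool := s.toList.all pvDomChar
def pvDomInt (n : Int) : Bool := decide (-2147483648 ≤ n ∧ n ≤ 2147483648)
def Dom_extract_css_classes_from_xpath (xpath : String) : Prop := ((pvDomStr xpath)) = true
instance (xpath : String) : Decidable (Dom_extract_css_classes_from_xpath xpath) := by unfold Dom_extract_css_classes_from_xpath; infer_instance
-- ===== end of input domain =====

-- B replaces A's split-into-parts pass by a single forward scan with str.find (alternative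
-- decomposition, same linear cost; no parts list is materialised).

-- "[@class='" and "']" as character lists (both ports share the two literals)
def pvMarker : List Char := "[@class='".toList
def pvEnd : List Char := "']".toList

-- ===== PORT A =====
-- literal transliteration of A: guard `"[@class='" in xpath`, split, iterate over parts[1:],
-- per part find "']" and slice part[:class_end]
def extract_css_classes_from_xpath (xpath : String) : List String :=
  let s := xpath.toList
  if PySem.Chars.isIn pvMarker s then
    (PySem.List.slice (PySem.Chars.splitOn s pvMarker) (some 1) none).foldl
      (fun classes part =>
        let class_end := PySem.Chars.find part pvEnd
        if class_end ≠ -1 then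
          classes ++ [String.ofList (PySem.List.slice part none (some class_end))]
        else classes) []
  else []

-- ===== PORT B =====
-- literal transliteration of B's while loop: state = (classes, s); each iteration finds the
-- next marker, cuts s after it, and appends s[:e] when the "']" at e precedes the next marker.
def pvBLoop (classes : List String) (s : List Char) : List String :=
  let i := PySem.Chars.find s pvMarker
  if hi : i = -1 then classes
  else
    let s' := PySem.List.slice s (some (i + 9)) none
    let i2 := PySem.Chars.find s' pvMarker
    let e := PySem.Chars.find s' pvEnd
    let classes' :=
      if e ≠ -1 ∧ (i2 = -1 ∨ e < i2) then
        classes ++ [String.ofList (PySem.List.slice s' none (some e))]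
      else classes
    pvBLoop classes' s'
  termination_by s.length
  decreasing_by
    have h0 : -1 ≤ PySem.Chars.find s pvMarker := PySem.Chars.neg_one_le_find s pvMarker
    have hnn : ¬ PySem.Chars.find s pvMarker = -1 := hi
    have hpos : 0 ≤ PySem.Chars.find s pvMarker := by omega
    have hin : pvMarker <:+: s := by
      by_contra hc
      exact hnn ((PySem.Chars.find_eq_neg_one_iff s pvMarker).mpr hc)
    have hlen : 0 < s.length := by
      have := hin.length_le
      simp [pvMarker] at this
      omega
    have : PySem.List.slice s (some (PySem.Chars.find s pvMarker + 9)) none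
        = List.drop (PySem.Chars.find s pvMarker + 9).toNat s :=
      PySem.List.slice_from s (by omega)
    rw [this, List.length_drop]
    omega

def extract_css_classes_from_xpath_alt (xpath : String) : List String :=
  pvBLoop [] xpath.toList

-- ===== PRECONDITION & SPEC =====
def Spec_extract_css_classes_from_xpath (xpath : String) (out : List String) : Prop := out = extract_css_classes_from_xpath_alt xpath
instance (xpath : String) (out : List String) : Decidable (Spec_extract_css_classes_from_xpath xpath out) := by unfold Spec_extract_css_classes_from_xpath; infer_instance

-- ===== CLAIM (what is proved, stated in full; the proofs are below) =====
def Claim_equal_extract_css_classes_from_xpath : Prop := ∀ (xpath : String), Dom_extract_css_classes_from_xpath xpath → Spec_extract_css_classes_from_xpath xpath (extract_css_classes_from_xpath xpath)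

-- ===== LEMMAS AND PROOFS =====

-- A's per-part body, abstracted for the proofs
def pvF (classes : List String) (part : List Char) : List String :=
  if PySem.Chars.find part pvEnd ≠ -1 then
    classes ++ [String.ofList (PySem.List.slice part none (some (PySem.Chars.find part pvEnd)))]
  else classes

-- find = k from an occurrence at k that is minimal
theorem pvFind_eq_of {l sub : List Char} {k : Nat} (h1 : sub <+: l.drop k)
    (h2 : ∀ j < k, ¬ sub <+: l.drop j) : PySem.Chars.find l sub = (k : Int) := by
  have hin : sub <:+: l := (h1.isInfix).trans (List.drop_suffix k l).isInfix
  have hne : PySem.Chars.find l sub ≠ -1 :=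
    (PySem.Chars.find_ne_neg_one_iff l sub).mpr hin
  have h0 : 0 ≤ PySem.Chars.find l sub := by
    have := PySem.Chars.neg_one_le_find l sub; omega
  obtain ⟨hp, hmin⟩ := PySem.Chars.find_spec (s := l) (sub := sub) h0
  have hk : (PySem.Chars.find l sub).toNat = k := by
    rcases Nat.lt_trichotomy (PySem.Chars.find l sub).toNat k with h | h | h
    · exact absurd hp (h2 _ h)
    · exact h
    · exact absurd h1 (hmin _ h)
  omega

-- splitOn.go on a chunk without any separator occurrence
theorem pvGo_no (sep : List Char) :
    ∀ (l : List Char) (fuel : Nat) (cur : List Char) (acc : List (List Char)),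
    l.length < fuel → ¬ sep <:+: l →
    PySem.Chars.splitOn.go sep fuel l cur acc = acc.reverse ++ [cur.reverse ++ l] := by
  intro l
  induction l with
  | nil =>
    intro fuel cur acc hf _
    match fuel, hf with
    | fuel+1, _ => rw [PySem.Chars.splitOn.go.eq_def]; simp
  | cons c rest ih =>
    intro fuel cur acc hf hin
    match fuel, hf with
    | fuel+1, hf =>
      rw [PySem.Chars.splitOn.go.eq_def]
      have hnp : ¬ sep <+: (c :: rest) := fun hp => hin hp.isInfix
      have hnr : ¬ sep <:+: rest := fun h => hin (h.trans (List.suffix_cons c rest).isInfix)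
      simp only [List.isPrefixOf_iff_prefix, hnp]
      rw [ih fuel (c :: cur) acc (by simpa using Nat.lt_of_succ_lt_succ hf) hnr]
      simp

-- splitOn.go: the accumulator factors out and any sufficient fuel gives the same value
theorem pvGo_acc_fuel (sep : List Char) (hsep : sep ≠ []) :
    ∀ (n : Nat) (l : List Char), l.length ≤ n → ∀ (fuel fuel' : Nat) (cur : List Char) (acc : List (List Char)),
    l.length < fuel → l.length < fuel' →
    PySem.Chars.splitOn.go sep fuel l cur acc
      = acc.reverse ++ PySem.Chars.splitOn.go sep fuel' l cur [] := by
  intro n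
  induction n with
  | zero =>
    intro l hl fuel fuel' cur acc hf hf'
    match l, hl with
    | [], _ =>
      match fuel, hf, fuel', hf' with
      | fuel+1, _, fuel'+1, _ =>
        rw [PySem.Chars.splitOn.go.eq_def, PySem.Chars.splitOn.go.eq_def]; simp
  | succ n ih =>
    intro l hl fuel fuel' cur acc hf hf'
    match l with
    | [] =>
      match fuel, hf, fuel', hf' with
      | fuel+1, _, fuel'+1, _ =>
        rw [PySem.Chars.splitOn.go.eq_def, PySem.Chars.splitOn.go.eq_def]; simp
    | c :: rest =>
      match fuel, hf, fuel', hf' with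
      | fuel+1, hf, fuel'+1, hf' =>
        rw [PySem.Chars.splitOn.go.eq_def, PySem.Chars.splitOn.go.eq_def]
        simp only [List.isPrefixOf_iff_prefix]
        have hsl : 1 ≤ sep.length := by
          cases sep with | nil => exact absurd rfl hsep | cons a b => simp
        by_cases hp : sep <+: (c :: rest)
        · simp only [hp, if_pos]
          have hlen : (List.drop sep.length (c :: rest)).length ≤ n := by
            simp at hl ⊢
            omega
          rw [ih _ hlen fuel (List.drop sep.length (c :: rest)).length.succ [] (cur.reverse :: acc)
              (by simp only [List.length_drop, List.length_cons] at hf ⊢; omega) (Nat.lt_succ_self _),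
            ih _ hlen fuel' (List.drop sep.length (c :: rest)).length.succ [] [cur.reverse]
              (by simp only [List.length_drop, List.length_cons] at hf' ⊢; omega) (Nat.lt_succ_self _)]
          simp
        · simp only [hp, if_neg]
          have hlen : rest.length ≤ n := by simp at hl; omega
          rw [ih _ hlen fuel rest.length.succ (c :: cur) acc
              (by simp only [List.length_drop, List.length_cons] at hf ⊢; omega) (Nat.lt_succ_self _),
            ih _ hlen fuel' rest.length.succ (c :: cur) []
              (by simp only [List.length_drop, List.length_cons] at hf' ⊢; omega) (Nat.lt_succ_self _)]
          simp

-- splitOn.go consumes the text up to and including the FIRST separator occurrence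
theorem pvGo_step (sep : List Char) (hsep : sep ≠ []) :
    ∀ (k : Nat) (l : List Char) (fuel : Nat) (cur : List Char) (acc : List (List Char)),
    l.length < fuel → sep <+: l.drop k → (∀ j < k, ¬ sep <+: l.drop j) →
    PySem.Chars.splitOn.go sep fuel l cur acc
      = PySem.Chars.splitOn.go sep (fuel - k - 1) (l.drop (k + sep.length)) []
          ((cur.reverse ++ l.take k) :: acc) := by
  intro k
  induction k with
  | zero =>
    intro l fuel cur acc hf hk _
    simp only [List.drop_zero] at hk
    have hl : l ≠ [] := by
      intro h; rw [h] at hk; exact hsep (List.prefix_nil.mp hk)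
    match l, hl with
    | c :: rest, _ =>
      match fuel, hf with
      | fuel+1, _ =>
        rw [PySem.Chars.splitOn.go.eq_def]
        simp only [List.isPrefixOf_iff_prefix, hk, if_pos]
        simp
  | succ k ih =>
    intro l fuel cur acc hf hk hmin
    have hl : l ≠ [] := by
      intro h
      rw [h] at hk; simp at hk; exact hsep hk
    match l, hl with
    | c :: rest, _ =>
      match fuel, hf with
      | fuel+1, hf =>
        rw [PySem.Chars.splitOn.go.eq_def]
        have hnp : ¬ sep <+: (c :: rest) := hmin 0 (Nat.succ_pos k)
        simp only [List.isPrefixOf_iff_prefix, hnp, if_neg]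
        rw [ih rest fuel (c :: cur) acc (by simp at hf ⊢; omega)
          (by simpa using hk)
          (fun j hj => by simpa using hmin (j+1) (by omega))]
        have h1 : fuel + 1 - (k + 1) - 1 = fuel - k - 1 := by omega
        have h2 : k + 1 + sep.length = (k + sep.length) + 1 := by omega
        rw [h1, h2, List.drop_succ_cons, List.take_succ_cons]
        simp

theorem pvMarker_ne : pvMarker ≠ [] := by decide

theorem pvSplitOn_no (s : List Char) (h : PySem.Chars.find s pvMarker = -1) :
    PySem.Chars.splitOn s pvMarker = [s] := by
  have hni : ¬ pvMarker <:+: s := (PySem.Chars.find_eq_neg_one_iff s pvMarker).mp h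
  show PySem.Chars.splitOn.go pvMarker (s.length + 1) s [] [] = [s]
  rw [pvGo_no pvMarker s (s.length + 1) [] [] (Nat.lt_succ_self _) hni]
  simp

theorem pvSplitOn_rec (s : List Char) (h0 : 0 ≤ PySem.Chars.find s pvMarker) :
    PySem.Chars.splitOn s pvMarker
      = s.take (PySem.Chars.find s pvMarker).toNat
        :: PySem.Chars.splitOn (s.drop ((PySem.Chars.find s pvMarker).toNat + 9)) pvMarker := by
  obtain ⟨hp, hmin⟩ := PySem.Chars.find_spec (s := s) (sub := pvMarker) h0
  set k := (PySem.Chars.find s pvMarker).toNat with hk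
  have hlen9 : k + 9 ≤ s.length := by
    have := hp.length_le
    simp only [List.length_drop] at this
    have h9 : pvMarker.length = 9 := by decide
    omega
  show PySem.Chars.splitOn.go pvMarker (s.length + 1) s [] [] = _
  rw [pvGo_step pvMarker pvMarker_ne k s (s.length + 1) [] [] (Nat.lt_succ_self _) hp hmin]
  have h9 : pvMarker.length = 9 := by decide
  rw [h9]
  have hdl : (s.drop (k + 9)).length < s.length + 1 - k - 1 := by
    simp only [List.length_drop]; omega
  rw [pvGo_acc_fuel pvMarker pvMarker_ne (s.drop (k + 9)).length (s.drop (k + 9)) le_rfl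
      _ ((s.drop (k + 9)).length + 1) [] _ hdl (Nat.lt_succ_self _)]
  simp [PySem.Chars.splitOn]

-- find "']" inside the part cut at the next marker
theorem pvFind_take (s : List Char) (h0 : 0 ≤ PySem.Chars.find s pvMarker) :
    PySem.Chars.find (s.take (PySem.Chars.find s pvMarker).toNat) pvEnd
      = if PySem.Chars.find s pvEnd ≠ -1 ∧ PySem.Chars.find s pvEnd < PySem.Chars.find s pvMarker
        then PySem.Chars.find s pvEnd else -1 := by
  obtain ⟨hm, hminM⟩ := PySem.Chars.find_spec (s := s) (sub := pvMarker) h0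
  set n := (PySem.Chars.find s pvMarker).toNat with hn
  by_cases hc : PySem.Chars.find s pvEnd ≠ -1 ∧ PySem.Chars.find s pvEnd < PySem.Chars.find s pvMarker
  · rw [if_pos hc]
    obtain ⟨hne, hlt⟩ := hc
    have he0 : 0 ≤ PySem.Chars.find s pvEnd := by
      have := PySem.Chars.neg_one_le_find s pvEnd; omega
    obtain ⟨hp, hminE⟩ := PySem.Chars.find_spec (s := s) (sub := pvEnd) he0
    set en := (PySem.Chars.find s pvEnd).toNat with hen
    have hlt' : en < n := by omega
    -- en + 1 = n is impossible: s[n] = '[' (marker) but s[en+1] = ']'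
    have hgap : en + 2 ≤ n := by
      rcases Nat.lt_or_ge (en + 1) n with h | h
      · omega
      have heq : en + 1 = n := by omega
      exfalso
      rcases hp with ⟨t, ht⟩
      rcases hm with ⟨u, hu⟩
      have hdr : s.drop n = List.drop 1 (s.drop en) := by
        rw [List.drop_drop]; congr 1; omega
      rw [← ht] at hdr
      rw [hdr] at hu
      simp [pvEnd, pvMarker] at hu
    have heq2 : PySem.Chars.find s pvEnd = (en : Int) := by omega
    rw [heq2]
    apply pvFind_eq_of (k := en)
    · rw [List.drop_take, List.prefix_take_iff]
      refine ⟨hp, ?_⟩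
      have : pvEnd.length = 2 := by decide
      omega
    · intro j hj hpre
      rw [List.drop_take, List.prefix_take_iff] at hpre
      exact hminE j hj hpre.1
  · rw [if_neg hc]
    rw [PySem.Chars.find_eq_neg_one_iff]
    intro hinf
    obtain ⟨j, hj⟩ := (PySem.Chars.exists_prefix_drop_iff_isIn pvEnd (s.take n)).mpr
      ((PySem.Chars.isIn_iff_infix pvEnd (s.take n)).mpr hinf)
    rw [List.drop_take, List.prefix_take_iff] at hj
    obtain ⟨hjs, hjl⟩ := hj
    have h2 : pvEnd.length = 2 := by decide
    have hne : PySem.Chars.find s pvEnd ≠ -1 := by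
      rw [PySem.Chars.find_ne_neg_one_iff]
      exact (hjs.isInfix).trans (List.drop_suffix j s).isInfix
    have he0 : 0 ≤ PySem.Chars.find s pvEnd := by
      have := PySem.Chars.neg_one_le_find s pvEnd; omega
    obtain ⟨_, hminE⟩ := PySem.Chars.find_spec (s := s) (sub := pvEnd) he0
    have hge : PySem.Chars.find s pvMarker ≤ PySem.Chars.find s pvEnd := by
      by_contra hlt
      exact hc ⟨hne, by omega⟩
    have hjlt : j < (PySem.Chars.find s pvEnd).toNat := by omega
    exact hminE j hjlt hjs

-- the B loop computes A's fold over the parts after the first marker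
theorem pvMain : ∀ (fuel : Nat) (s : List Char), s.length ≤ fuel → ∀ (classes : List String),
    pvBLoop classes s = ((PySem.Chars.splitOn s pvMarker).tail).foldl pvF classes := by
  intro fuel
  induction fuel with
  | zero =>
    intro s hs classes
    match s, hs with
    | [], _ =>
      rw [pvBLoop]
      have h : PySem.Chars.find [] pvMarker = -1 := by decide
      rw [dif_pos h, pvSplitOn_no [] h]
      simp
  | succ fuel ih =>
    intro s hs classes
    rw [pvBLoop]
    by_cases hi : PySem.Chars.find s pvMarker = -1
    · rw [dif_pos hi, pvSplitOn_no s hi]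
      simp
    · rw [dif_neg hi]
      have h0 : 0 ≤ PySem.Chars.find s pvMarker := by
        have := PySem.Chars.neg_one_le_find s pvMarker; omega
      have hsl : PySem.List.slice s (some (PySem.Chars.find s pvMarker + 9)) none
          = s.drop ((PySem.Chars.find s pvMarker).toNat + 9) := by
        rw [PySem.List.slice_from s (by omega)]
        congr 1; omega
      rw [hsl]
      set s' := s.drop ((PySem.Chars.find s pvMarker).toNat + 9) with hs'
      have hm : pvMarker <+: s.drop (PySem.Chars.find s pvMarker).toNat :=
        (PySem.Chars.find_spec (s := s) (sub := pvMarker) h0).1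
      have hlen9 : (PySem.Chars.find s pvMarker).toNat + 9 ≤ s.length := by
        have := hm.length_le
        simp only [List.length_drop] at this
        have h9 : pvMarker.length = 9 := by decide
        omega
      have hs'len : s'.length ≤ fuel := by
        rw [hs', List.length_drop]; omega
      rw [pvSplitOn_rec s h0]
      simp only [List.tail_cons]
      -- split s' once more to expose the head part A folds over
      by_cases hi2 : PySem.Chars.find s' pvMarker = -1
      · rw [pvSplitOn_no s' hi2]
        simp only [List.foldl_cons, List.foldl_nil]
        rw [ih s' hs'len]
        rw [pvSplitOn_no s' hi2]
        simp only [List.tail_cons, List.foldl_nil]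
        congr 1
        by_cases he : PySem.Chars.find s' pvEnd = -1
        · simp [pvF, he]
        · simp [pvF, he, hi2]
      · have h02 : 0 ≤ PySem.Chars.find s' pvMarker := by
          have := PySem.Chars.neg_one_le_find s' pvMarker; omega
        rw [pvSplitOn_rec s' h02]
        simp only [List.foldl_cons]
        rw [ih s' hs'len]
        rw [pvSplitOn_rec s' h02]
        simp only [List.tail_cons]
        congr 1
        simp only [pvF]
        rw [pvFind_take s' h02]
        by_cases hc : PySem.Chars.find s' pvEnd ≠ -1 ∧ PySem.Chars.find s' pvEnd < PySem.Chars.find s' pvMarker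
        · have he0 : 0 ≤ PySem.Chars.find s' pvEnd := by
            have := PySem.Chars.neg_one_le_find s' pvEnd; omega
          rw [if_pos hc, if_pos hc.1,
            if_pos (show PySem.Chars.find s' pvEnd ≠ -1 ∧
                (PySem.Chars.find s' pvMarker = -1 ∨
                  PySem.Chars.find s' pvEnd < PySem.Chars.find s' pvMarker) from ⟨hc.1, Or.inr hc.2⟩)]
          rw [PySem.List.slice_to _ he0, PySem.List.slice_to _ he0, List.take_take]
          rw [Nat.min_eq_left (by omega)]
        · have hB : ¬(PySem.Chars.find s' pvEnd ≠ -1 ∧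
              (PySem.Chars.find s' pvMarker = -1 ∨
                PySem.Chars.find s' pvEnd < PySem.Chars.find s' pvMarker)) := by
            intro h
            rcases h.2 with h2 | h2
            · exact hi2 h2
            · exact hc ⟨h.1, h2⟩
          rw [if_neg hc, if_neg hB]
          simp

-- ===== VERDICT (by name: the statement is the Claim_ definition above) =====
theorem extract_css_classes_from_xpath_spec : Claim_equal_extract_css_classes_from_xpath := by
  intro xpath _
  unfold Spec_extract_css_classes_from_xpath
  unfold extract_css_classes_from_xpath extract_css_classes_from_xpath_alt
  rw [pvMain xpath.toList.length xpath.toList le_rfl []]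
  set s := xpath.toList
  have hfun : (fun (classes : List String) (part : List Char) =>
      let class_end := PySem.Chars.find part pvEnd
      if class_end ≠ -1 then
        classes ++ [String.ofList (PySem.List.slice part none (some class_end))]
      else classes) = pvF := rfl
  by_cases hin : PySem.Chars.isIn pvMarker s
  · rw [if_pos hin]
    have h1 : PySem.List.slice (PySem.Chars.splitOn s pvMarker) (some 1) none
        = (PySem.Chars.splitOn s pvMarker).tail := by
      rw [PySem.List.slice_from _ (by omega)]
      simp [List.drop_one]
    rw [h1, hfun]
  · rw [if_neg hin]
    have hni : ¬ pvMarker <:+: s := fun h => hin ((PySem.Chars.isIn_iff_infix pvMarker s).mpr h)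
    have hf : PySem.Chars.find s pvMarker = -1 := (PySem.Chars.find_eq_neg_one_iff s pvMarker).mpr hni
    rw [pvSplitOn_no s hf]
    simp
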